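-- pv_equiv track=rewrite | github.com/kruemmel-python/NOVA-SYNESIS | src/nova_synesis/planning/lit_planner.py | _replace_keyword_literals
-- ===== SOURCE A (Python) =====
-- def _replace_keyword_literals(candidate: str, replacements: dict[str, str]) -> str:
--     result: list[str] = []
--     token: list[str] = []
--     in_string = False
--     escaped = False
--     quote_char = ""
--
--     def flush_token() -> None:
--         if not token:
--             return
--         value = "".join(token)
--         result.append(replacements.get(value, value))
--         token.clear()
--
--     for character in candidate:
--         if in_string:
--             result.append(character)
--             if escaped:
--                 escaped = False
--             elif character == "\\":
--                 escaped = True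
--             elif character == quote_char:
--                 in_string = False
--             continue
--
--         if character in {'"', "'"}:
--             flush_token()
--             in_string = True
--             quote_char = character
--             result.append(character)
--             continue
--
--         if character.isalnum() or character == "_":
--             token.append(character)
--             continue
--
--         flush_token()
--         result.append(character)
--
--     flush_token()
--     return "".join(result)
-- ===== SOURCE B (Python) =====
-- def _replace_keyword_literals(candidate: str, replacements: dict[str, str]) -> str:
--     # Span-based scan: jump over whole string literals and whole identifier
--     # tokens with inner index loops instead of a per-character state machine.
--     n = len(candidate)
--     pieces: list[str] = []
--     i = 0
--     while i < n:
--         c = candidate[i]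
--         if c == '"' or c == "'":
--             j = i + 1
--             while j < n:
--                 if candidate[j] == "\\":
--                     j += 2
--                 elif candidate[j] == c:
--                     j += 1
--                     break
--                 else:
--                     j += 1
--             pieces.append(candidate[i:j])
--             i = min(j, n)
--         elif c.isalnum() or c == "_":
--             j = i + 1
--             while j < n and (candidate[j].isalnum() or candidate[j] == "_"):
--                 j += 1
--             tok = candidate[i:j]
--             pieces.append(replacements.get(tok, tok))
--             i = j
--         else:
--             pieces.append(c)
--             i += 1
--     return "".join(pieces)
-- ===== Notes on version B (the rewrite author's own statement) =====
-- stated objective: alternative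
-- what changed: Replaced A's per-character five-field state machine (in_string/escaped/quote_char flags plus a token accumulator) with a span scanner that consumes a whole string literal or a whole identifier token per outer-loop step and joins the pieces.
import Mathlib
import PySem

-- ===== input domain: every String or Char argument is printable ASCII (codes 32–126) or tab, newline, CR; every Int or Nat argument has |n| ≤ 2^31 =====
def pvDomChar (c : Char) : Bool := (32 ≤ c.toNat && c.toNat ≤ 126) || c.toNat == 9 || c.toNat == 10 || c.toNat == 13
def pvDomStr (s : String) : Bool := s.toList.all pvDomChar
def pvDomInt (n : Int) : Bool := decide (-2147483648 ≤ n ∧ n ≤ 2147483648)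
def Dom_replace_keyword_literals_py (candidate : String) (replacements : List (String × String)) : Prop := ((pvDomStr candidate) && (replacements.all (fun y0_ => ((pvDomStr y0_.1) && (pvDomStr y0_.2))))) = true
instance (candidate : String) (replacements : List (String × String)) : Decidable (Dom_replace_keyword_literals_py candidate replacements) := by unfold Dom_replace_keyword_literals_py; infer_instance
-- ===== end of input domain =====

-- B scans by spans (whole string literals / whole identifier tokens consumed by inner
-- helpers) instead of A's per-character flag state machine; same return value.


-- ===== PORT A =====
-- flush_token(): append replacements.get(value, value) unless the token is empty
def pvFlushA (reps : List (String × String)) (res tok : List Char) : List Char :=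
  if tok = [] then res
  else
    let value := String.ofList tok
    res ++ (match reps.lookup value with
            | some r => r.toList
            | none => tok)

-- one iteration of A's `for character in candidate` loop over the state
-- (result, token, in_string, escaped, quote_char)
def pvStepA (reps : List (String × String))
    (s : List Char × List Char × Bool × Bool × String) (c : Char) :
    List Char × List Char × Bool × Bool × String :=
  let (res, tok, ins, esc, q) := s
  if ins then
    let res := res ++ [c]
    if esc then (res, tok, true, false, q)
    else if c = '\\' then (res, tok, true, true, q)
    else if String.ofList [c] = q then (res, tok, false, esc, q)
    else (res, tok, true, esc, q)
  else if c = '"' ∨ c = '\'' then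
    (pvFlushA reps res tok ++ [c], [], true, esc, String.ofList [c])
  else if PySem.Chars.isalnum c || c = '_' then
    (res, tok ++ [c], ins, esc, q)
  else
    (pvFlushA reps res tok ++ [c], [], ins, esc, q)

def replace_keyword_literals_py (candidate : String) (replacements : List (String × String)) : String :=
  let s := candidate.toList.foldl (pvStepA replacements) ([], [], false, false, "")
  String.ofList (pvFlushA replacements s.1 s.2.1)

-- ===== PORT B =====
-- identifier character: character.isalnum() or character == '_'
def pvIdChar (c : Char) : Bool := PySem.Chars.isalnum c || c = '_'

-- the inner literal loop of B: consume a string literal opened by quote q,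
-- returning (the consumed characters, the rest after the closing quote)
def pvTakeLit (q : Char) : List Char → List Char × List Char
  | [] => ([], [])
  | c :: cs =>
    if c = '\\' then
      match cs with
      | [] => ([c], [])
      | d :: ds => let p := pvTakeLit q ds; (c :: d :: p.1, p.2)
    else if c = q then ([c], cs)
    else let p := pvTakeLit q cs; (c :: p.1, p.2)

theorem pvTakeLit_len (q : Char) (cs : List Char) : (pvTakeLit q cs).2.length ≤ cs.length := by
  induction cs using pvTakeLit.induct q with
  | case1 => simp [pvTakeLit]
  | case2 => simp [pvTakeLit]
  | case3 d ds ih => simp [pvTakeLit]; omega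
  | case4 ds hq => rw [pvTakeLit.eq_def]; simp [hq]
  | case5 d ds hne hne2 ih => rw [pvTakeLit.eq_def]; simp [hne, hne2]; omega

-- B's main loop: one piece per step — a whole literal, a whole identifier token, or one char
def pvGoB (reps : List (String × String)) : List Char → List Char
  | [] => []
  | c :: cs =>
    if c = '"' ∨ c = '\'' then
      let p := pvTakeLit c cs
      c :: (p.1 ++ pvGoB reps p.2)
    else if pvIdChar c then
      let p := cs.span pvIdChar
      let tok := c :: p.1
      (match reps.lookup (String.ofList tok) with
       | some r => r.toList
       | none => tok) ++ pvGoB reps p.2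
    else c :: pvGoB reps cs
termination_by cs => cs.length
decreasing_by
  · have := pvTakeLit_len c cs; simp; omega
  · simp [List.span_eq_takeWhile_dropWhile]
    have := List.length_dropWhile_le pvIdChar cs; omega
  · simp

def replace_keyword_literals_py_alt (candidate : String) (replacements : List (String × String)) : String :=
  String.ofList (pvGoB replacements candidate.toList)

-- ===== PRECONDITION & SPEC =====
def Spec_replace_keyword_literals_py (candidate : String) (replacements : List (String × String)) (out : String) : Prop := out = replace_keyword_literals_py_alt candidate replacements
instance (candidate : String) (replacements : List (String × String)) (out : String) : Decidable (Spec_replace_keyword_literals_py candidate replacements out) := by unfold Spec_replace_keyword_literals_py; infer_instance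

-- ===== CLAIM (what is proved, stated in full; the proofs are below) =====
def Claim_equal_replace_keyword_literals_py : Prop := ∀ (candidate : String) (replacements : List (String × String)), Dom_replace_keyword_literals_py candidate replacements → Spec_replace_keyword_literals_py candidate replacements (replace_keyword_literals_py candidate replacements)

-- ===== LEMMAS AND PROOFS =====

-- A's run from an arbitrary state, followed by the final flush
def pvOutA (reps : List (String × String)) (res tok : List Char) (ins esc : Bool) (q : String)
    (cs : List Char) : List Char :=
  let s := cs.foldl (pvStepA reps) (res, tok, ins, esc, q)
  pvFlushA reps s.1 s.2.1

-- replacement of a (possibly empty) pending token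
def pvRep (reps : List (String × String)) (tok : List Char) : List Char :=
  if tok = [] then []
  else match reps.lookup (String.ofList tok) with
       | some r => r.toList
       | none => tok

theorem pvFlushA_eq (reps : List (String × String)) (res tok : List Char) :
    pvFlushA reps res tok = res ++ pvRep reps tok := by
  by_cases h : tok = [] <;> simp [pvFlushA, pvRep, h]

-- in-string processing of A equals consuming the literal with pvTakeLit, then continuing
-- unfolding equations for pvTakeLit
theorem pvTakeLit_bs (q d : Char) (ds : List Char) :
    pvTakeLit q ('\\' :: d :: ds) = ('\\' :: d :: (pvTakeLit q ds).1, (pvTakeLit q ds).2) := rfl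

theorem pvTakeLit_close (q : Char) (ds : List Char) (hq : ¬ q = '\\') :
    pvTakeLit q (q :: ds) = ([q], ds) := by
  rw [pvTakeLit.eq_def]; simp [hq]

theorem pvTakeLit_other (q d : Char) (ds : List Char) (hne : ¬ d = '\\') (hne2 : ¬ d = q) :
    pvTakeLit q (d :: ds) = (d :: (pvTakeLit q ds).1, (pvTakeLit q ds).2) := by
  rw [pvTakeLit.eq_def]; simp [hne, hne2]

theorem pvLstr (reps : List (String × String)) (q : Char) (cs : List Char) :
    ∀ res : List Char, pvOutA reps res [] true false (String.ofList [q]) cs =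
      pvOutA reps (res ++ (pvTakeLit q cs).1) [] false false (String.ofList [q]) (pvTakeLit q cs).2 := by
  induction cs using pvTakeLit.induct q with
  | case1 => intro res; simp [pvTakeLit, pvOutA]
  | case2 => intro res; simp [pvTakeLit, pvOutA, pvStepA]
  | case3 d ds ih =>
      intro res
      have hstep : pvOutA reps res [] true false (String.ofList [q]) ('\\' :: d :: ds) =
          pvOutA reps (res ++ ['\\'] ++ [d]) [] true false (String.ofList [q]) ds := by
        simp [pvOutA, pvStepA]
      rw [hstep, ih, pvTakeLit_bs]; simp
  | case4 ds hq =>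
      intro res
      rw [pvTakeLit_close q ds hq]
      simp [pvOutA, pvStepA, hq]
  | case5 d ds hne hne2 ih =>
      intro res
      have hqeq : ¬ (String.ofList [d] = String.ofList [q]) := by
        simp only [String.ofList_inj, List.cons.injEq, and_true]; exact hne2
      have hstep : pvOutA reps res [] true false (String.ofList [q]) (d :: ds) =
          pvOutA reps (res ++ [d]) [] true false (String.ofList [q]) ds := by
        simp [pvOutA, pvStepA, hne, hqeq]
      rw [hstep, ih, pvTakeLit_other q d ds hne hne2]; simp

-- B's main loop with a pending token carried in (bridges A's token accumulator to B's spans)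
def pvGoTok (reps : List (String × String)) (tok : List Char) : List Char → List Char
  | [] => pvRep reps tok
  | c :: cs =>
    if pvIdChar c then pvGoTok reps (tok ++ [c]) cs
    else pvRep reps tok ++ pvGoB reps (c :: cs)

theorem pvGoTok_span (reps : List (String × String)) (cs : List Char) :
    ∀ tok, pvGoTok reps tok cs =
      pvRep reps (tok ++ (cs.span pvIdChar).1) ++ pvGoB reps (cs.span pvIdChar).2 := by
  induction cs with
  | nil => intro tok; simp [pvGoTok, pvGoB]
  | cons c cs ih =>
      intro tok
      by_cases h : pvIdChar c = true
      · rw [show pvGoTok reps tok (c :: cs) = pvGoTok reps (tok ++ [c]) cs from by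
          simp [pvGoTok, h], ih]
        simp [List.span_eq_takeWhile_dropWhile, List.takeWhile_cons, List.dropWhile_cons, h]
      · simp [pvGoTok, h, List.span_eq_takeWhile_dropWhile, List.takeWhile_cons,
          List.dropWhile_cons, h]

theorem pvQuote_not_id (c : Char) (h : c = '"' ∨ c = '\'') : pvIdChar c = false := by
  rcases h with h | h <;> subst h <;> decide

theorem pvGoB_eq_goTok (reps : List (String × String)) (cs : List Char) :
    pvGoB reps cs = pvGoTok reps [] cs := by
  cases cs with
  | nil => simp [pvGoB, pvGoTok, pvRep]
  | cons c cs =>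
      by_cases hq : c = '"' ∨ c = '\''
      · have := pvQuote_not_id c hq
        simp [pvGoTok, this, pvRep]
      · by_cases hid : pvIdChar c = true
        · rw [show pvGoTok reps [] (c :: cs) = pvGoTok reps [c] cs from by simp [pvGoTok, hid],
            pvGoTok_span]
          have hne : ¬ (c :: (cs.span pvIdChar).1 = []) := by simp
          simp [pvGoB, hq, hid, pvRep]
        · simp [pvGoTok, hid, pvRep]

-- main invariant: A's neutral-mode run with pending token `tok` equals B's token-carrying loop
theorem pvLmain (reps : List (String × String)) :
    ∀ n, ∀ cs : List Char, cs.length ≤ n → ∀ tok res : List Char, ∀ q : String,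
      pvOutA reps res tok false false q cs = res ++ pvGoTok reps tok cs := by
  intro n
  induction n with
  | zero =>
      intro cs h tok res q
      have : cs = [] := List.length_eq_zero_iff.mp (Nat.le_zero.mp h)
      subst this
      simp [pvOutA, pvGoTok, pvFlushA_eq]
  | succ n ih =>
      intro cs h tok res q
      cases cs with
      | nil => simp [pvOutA, pvGoTok, pvFlushA_eq]
      | cons c cs =>
          by_cases hq : c = '"' ∨ c = '\''
          · have hid := pvQuote_not_id c hq
            have hstep : pvOutA reps res tok false false q (c :: cs) =
                pvOutA reps (pvFlushA reps res tok ++ [c]) [] true false (String.ofList [c]) cs := by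
              simp [pvOutA, pvStepA, hq]
            rw [hstep, pvLstr]
            have hlen : (pvTakeLit c cs).2.length ≤ n := by
              have := pvTakeLit_len c cs; simp at h; omega
            rw [ih _ hlen]
            simp [pvGoTok, hid, pvFlushA_eq, pvGoB, hq, ← pvGoB_eq_goTok]
          · by_cases hid : pvIdChar c = true
            · have hstep : pvOutA reps res tok false false q (c :: cs) =
                  pvOutA reps res (tok ++ [c]) false false q cs := by
                have hid' := hid
                simp only [pvIdChar, Bool.or_eq_true, decide_eq_true_eq] at hid'
                simp [pvOutA, pvStepA, hq, hid']
              rw [hstep, ih _ (by simp at h; omega)]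
              simp [pvGoTok, hid]
            · have hstep : pvOutA reps res tok false false q (c :: cs) =
                  pvOutA reps (pvFlushA reps res tok ++ [c]) [] false false q cs := by
                have hid' := hid
                simp only [pvIdChar, Bool.or_eq_true, decide_eq_true_eq, not_or] at hid'
                simp [pvOutA, pvStepA, hq, hid'.1, hid'.2]
              rw [hstep, ih _ (by simp at h; omega)]
              simp [pvGoTok, pvFlushA_eq, ← pvGoB_eq_goTok, pvGoB, hq, hid]

-- ===== VERDICT (by name: the statement is the Claim_ definition above) =====
theorem replace_keyword_literals_py_spec : Claim_equal_replace_keyword_literals_py := by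
  intro candidate replacements _
  show String.ofList (pvOutA replacements [] [] false false "" candidate.toList) =
    replace_keyword_literals_py_alt candidate replacements
  rw [pvLmain replacements candidate.toList.length candidate.toList (le_refl _)]
  rw [← pvGoB_eq_goTok]
  rfl
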